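-- pv_equiv track=rewrite | github.com/FlexonaFFt/CodeRunYandex | RunSeason2/ML/556.pushisticky/pushisticky.py | time_mngmnt
-- ===== SOURCE A (Python) =====
-- def time_mngmnt(m, t, lst):
--     max_counter = 0
--     counter = []
--     sorted_lst = sorted(lst)
--     for push in sorted_lst:
--         if push < t:
--             counter.append(push)
--             if sum(counter) <= t:
--                 max_counter += 1
--     return max_counter
-- ===== SOURCE B (Python) =====
-- def time_mngmnt(m, t, lst):
--     items = sorted(p for p in lst if p < t)
--     prefix = []
--     run = 0
--     for p in items:
--         run += p
--         prefix.append(run)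
--     return sum(1 for s in prefix if s <= t)
-- ===== Notes on version B (the rewrite author's own statement) =====
-- stated objective: faster
-- what changed: B filters items below t first, builds the prefix-sum table in one linear pass, and counts entries <= t in a separate pass, instead of A's per-iteration sum(counter) rescan.
import Mathlib
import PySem

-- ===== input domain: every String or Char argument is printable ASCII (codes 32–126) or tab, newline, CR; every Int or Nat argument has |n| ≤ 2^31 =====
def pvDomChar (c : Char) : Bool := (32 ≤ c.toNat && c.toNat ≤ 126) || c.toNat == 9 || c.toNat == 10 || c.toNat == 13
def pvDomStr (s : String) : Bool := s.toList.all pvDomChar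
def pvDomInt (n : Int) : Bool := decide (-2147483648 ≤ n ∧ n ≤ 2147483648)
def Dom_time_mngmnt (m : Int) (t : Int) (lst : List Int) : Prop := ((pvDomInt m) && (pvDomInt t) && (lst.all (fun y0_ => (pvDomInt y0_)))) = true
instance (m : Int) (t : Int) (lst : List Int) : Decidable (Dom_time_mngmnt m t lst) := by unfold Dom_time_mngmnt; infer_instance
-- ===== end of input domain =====

-- B replaces A's per-iteration sum(counter) rescan by filter-then-sort, a linear prefix-sum
-- table build, and a separate counting pass (objective: faster).

-- ===== PORT A =====
def time_mngmnt (m : Int) (t : Int) (lst : List Int) : Int :=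
  let sorted_lst := PySem.List.sorted lst (fun x => x) false
  let res := sorted_lst.foldl (fun (st : Int × List Int) push =>
      if push < t then
        let counter := st.2 ++ [push]
        if counter.sum ≤ t then (st.1 + 1, counter) else (st.1, counter)
      else st) (0, [])
  res.1

-- ===== PORT B =====
def time_mngmnt_alt (m : Int) (t : Int) (lst : List Int) : Int :=
  let items := PySem.List.sorted (lst.filter (fun p => decide (p < t))) (fun x => x) false
  let fin := items.foldl (fun (st : Int × List Int) p =>
      (st.1 + p, st.2 ++ [st.1 + p])) (0, [])
  fin.2.foldl (fun c s => if s ≤ t then c + 1 else c) 0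

-- ===== PRECONDITION & SPEC =====
def Spec_time_mngmnt (m : Int) (t : Int) (lst : List Int) (out : Int) : Prop := out = time_mngmnt_alt m t lst
instance (m : Int) (t : Int) (lst : List Int) (out : Int) : Decidable (Spec_time_mngmnt m t lst out) := by unfold Spec_time_mngmnt; infer_instance

-- ===== CLAIM (what is proved, stated in full; the proofs are below) =====
def Claim_equal_time_mngmnt : Prop := ∀ (m : Int) (t : Int) (lst : List Int), Dom_time_mngmnt m t lst → Spec_time_mngmnt m t lst (time_mngmnt m t lst)

-- ===== LEMMAS AND PROOFS =====

-- count of prefix sums (starting from r) that stay ≤ t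
def pvCnt (t r : Int) : List Int → Int
  | [] => 0
  | p :: rest => (if r + p ≤ t then 1 else 0) + pvCnt t (r + p) rest

-- list of prefix sums starting from r
def pvPS (r : Int) : List Int → List Int
  | [] => []
  | p :: rest => (r + p) :: pvPS (r + p) rest

-- A's loop skips elements ≥ t, so it equals the guardless loop over the filtered list
theorem pvA_filter (t : Int) : ∀ (l : List Int) (st : Int × List Int),
    l.foldl (fun (st : Int × List Int) push =>
        if push < t then
          let counter := st.2 ++ [push]
          if counter.sum ≤ t then (st.1 + 1, counter) else (st.1, counter)
        else st) st
    = (l.filter (fun p => decide (p < t))).foldl (fun (st : Int × List Int) push =>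
        let counter := st.2 ++ [push]
        if counter.sum ≤ t then (st.1 + 1, counter) else (st.1, counter)) st := by
  intro l
  induction l with
  | nil => intro st; rfl
  | cons p rest ih =>
    intro st
    rw [List.filter_cons]
    by_cases hp : p < t
    · simp only [hp, decide_true, if_true, List.foldl_cons, if_pos hp]
      exact ih _
    · simp only [hp, decide_false, Bool.false_eq_true, if_false, List.foldl_cons, if_neg hp]
      exact ih _

-- the guardless loop counts prefix sums ≤ t
theorem pvA_cnt (t : Int) : ∀ (l : List Int) (k : Int) (c : List Int),
    (l.foldl (fun (st : Int × List Int) push =>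
        let counter := st.2 ++ [push]
        if counter.sum ≤ t then (st.1 + 1, counter) else (st.1, counter)) (k, c)).1
    = k + pvCnt t c.sum l := by
  intro l
  induction l with
  | nil => intro k c; simp [pvCnt]
  | cons p rest ih =>
    intro k c
    simp only [List.foldl_cons, pvCnt]
    rw [show ((c : List Int) ++ [p]).sum = c.sum + p by simp]
    split_ifs with h <;>
      rw [ih, show ((c : List Int) ++ [p]).sum = c.sum + p by simp] <;> ring

-- B's first loop materialises the prefix-sum table
theorem pvB_ps (l : List Int) : ∀ (r : Int) (pre : List Int),
    (l.foldl (fun (st : Int × List Int) p =>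
        (st.1 + p, st.2 ++ [st.1 + p])) (r, pre)).2 = pre ++ pvPS r l := by
  induction l with
  | nil => intro r pre; simp [pvPS]
  | cons p rest ih =>
    intro r pre
    simp only [List.foldl_cons, pvPS]
    rw [ih]
    simp

-- B's counting pass over the table equals pvCnt
theorem pvB_cnt (t : Int) : ∀ (l : List Int) (r k : Int),
    (pvPS r l).foldl (fun c s => if s ≤ t then c + 1 else c) k = k + pvCnt t r l := by
  intro l
  induction l with
  | nil => intro r k; simp [pvPS, pvCnt]
  | cons p rest ih =>
    intro r k
    simp only [pvPS, pvCnt, List.foldl_cons]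
    split_ifs with h <;> rw [ih] <;> ring

-- filtering commutes with sorting (elements are the values themselves)
theorem pv_sort_filter (t : Int) (lst : List Int) :
    PySem.List.sorted (lst.filter (fun p => decide (p < t))) (fun x => x) false
      = (PySem.List.sorted lst (fun x => x) false).filter (fun p => decide (p < t)) := by
  apply PySem.List.sorted_id_eq_of_perm_of_pairwise
  · exact (PySem.List.sorted_perm lst (fun x => x) false).filter _
  · exact (PySem.List.sorted_pairwise lst (fun x => x)).filter _

-- ===== VERDICT (by name: the statement is the Claim_ definition above) =====
theorem time_mngmnt_spec : Claim_equal_time_mngmnt := by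
  intro m t lst _
  show time_mngmnt m t lst = time_mngmnt_alt m t lst
  simp only [time_mngmnt, time_mngmnt_alt]
  rw [pvA_filter, pvA_cnt, pv_sort_filter, pvB_ps, List.nil_append, pvB_cnt]
  simp
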